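-- pv_equiv track=rewrite | github.com/zfifteen/archive | unified-framework/src/discrete/crypto_prime_generator.py | _is_generalized_mersenne
-- ===== SOURCE A (Python) =====
-- from typing import List, Optional, Tuple, Dict, Any, Union
--
-- def _is_generalized_mersenne(p: int, gamma_max: int = 256) -> Tuple[bool, Tuple[int, int, int]]:
--     """
--     Check if prime p is generalized Mersenne: p = 2^α(2^β - γ) - 1
--
--     Returns:
--         (is_generalized, (alpha, beta, gamma))
--     """
--     if p <= 2:
--         return False, (0, 0, 0)
--
--     # Try small values of α and β
--     for alpha in range(1, 8):
--         for beta in range(1, 16):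
--             # p + 1 = 2^α(2^β - γ)
--             factor = 2**alpha
--             if (p + 1) % factor != 0:
--                 continue
--
--             quotient = (p + 1) // factor
--             # quotient = 2^β - γ, so γ = 2^β - quotient
--             power_2_beta = 2**beta
--             gamma = power_2_beta - quotient
--
--             if 0 < gamma <= gamma_max:
--                 return True, (alpha, beta, gamma)
--
--     return False, (0, 0, 0)
-- ===== SOURCE B (Python) =====
-- def _is_generalized_mersenne(p: int, gamma_max: int = 256):
--     """Direct form: for each alpha, the only viable beta is quotient.bit_length()."""
--     if p <= 2:
--         return False, (0, 0, 0)
--     for alpha in range(1, 8):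
--         if (p + 1) % (1 << alpha):
--             continue
--         quotient = (p + 1) >> alpha
--         beta = quotient.bit_length()  # smallest beta with 2**beta > quotient
--         if beta <= 15:
--             gamma = (1 << beta) - quotient
--             if gamma <= gamma_max:
--                 return True, (alpha, beta, gamma)
--     return False, (0, 0, 0)
-- ===== Notes on version B (the rewrite author's own statement) =====
-- stated objective: simpler
-- what changed: The inner 15-iteration beta scan is replaced by computing beta directly as quotient.bit_length() (the unique beta that can give 0 < gamma), keeping only the outer alpha loop.
import Mathlib
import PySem

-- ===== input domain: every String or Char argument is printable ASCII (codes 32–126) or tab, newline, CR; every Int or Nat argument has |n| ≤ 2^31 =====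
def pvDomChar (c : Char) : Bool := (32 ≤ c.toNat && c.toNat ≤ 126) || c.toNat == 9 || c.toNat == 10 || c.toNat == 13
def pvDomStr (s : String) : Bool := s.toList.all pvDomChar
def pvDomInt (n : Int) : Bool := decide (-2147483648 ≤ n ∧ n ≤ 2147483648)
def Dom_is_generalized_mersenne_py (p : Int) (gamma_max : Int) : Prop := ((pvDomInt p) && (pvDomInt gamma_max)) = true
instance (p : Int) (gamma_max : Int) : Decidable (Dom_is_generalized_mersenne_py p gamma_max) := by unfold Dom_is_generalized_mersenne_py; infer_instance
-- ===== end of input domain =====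

-- B replaces A's inner beta scan by computing beta directly as quotient.bit_length(); objective: simpler.

-- ===== PORT A =====
-- inner 'for beta in range(1, 16)' loop of A
def pvAInner (p gm alpha : Int) : List Int → Option (Int × Int × Int)
  | [] => none
  | beta :: rest =>
    let factor : Int := 2 ^ alpha.toNat
    if PySem.Int.mod (p + 1) factor ≠ 0 then pvAInner p gm alpha rest
    else
      let quotient := PySem.Int.floordiv (p + 1) factor
      let power_2_beta : Int := 2 ^ beta.toNat
      let gamma := power_2_beta - quotient
      if 0 < gamma ∧ gamma ≤ gm then some (alpha, beta, gamma)
      else pvAInner p gm alpha rest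

-- outer 'for alpha in range(1, 8)' loop of A
def pvAOuter (p gm : Int) : List Int → Option (Int × Int × Int)
  | [] => none
  | alpha :: rest =>
    match pvAInner p gm alpha (PySem.List.pyRange 1 16 1) with
    | some t => some t
    | none => pvAOuter p gm rest

def is_generalized_mersenne_py (p : Int) (gamma_max : Int) : Bool × (Int × Int × Int) :=
  if p ≤ 2 then (false, (0, 0, 0))
  else
    match pvAOuter p gamma_max (PySem.List.pyRange 1 8 1) with
    | some t => (true, t)
    | none => (false, (0, 0, 0))

-- ===== PORT B =====
-- single 'for alpha in range(1, 8)' loop of B; beta = quotient.bit_length()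
def pvBLoop (p gm : Int) : List Int → Option (Int × Int × Int)
  | [] => none
  | alpha :: rest =>
    let factor : Int := 2 ^ alpha.toNat
    if PySem.Int.mod (p + 1) factor ≠ 0 then pvBLoop p gm rest
    else
      let quotient := PySem.Int.floordiv (p + 1) factor
      let beta : Int := (PySem.Int.bitLength quotient : Int)
      if beta ≤ 15 then
        let gamma := (2 : Int) ^ beta.toNat - quotient
        if gamma ≤ gm then some (alpha, beta, gamma) else pvBLoop p gm rest
      else pvBLoop p gm rest

def is_generalized_mersenne_py_alt (p : Int) (gamma_max : Int) : Bool × (Int × Int × Int) :=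
  if p ≤ 2 then (false, (0, 0, 0))
  else
    match pvBLoop p gamma_max (PySem.List.pyRange 1 8 1) with
    | some t => (true, t)
    | none => (false, (0, 0, 0))

-- ===== PRECONDITION & SPEC =====
def Spec_is_generalized_mersenne_py (p : Int) (gamma_max : Int) (out : Bool × (Int × Int × Int)) : Prop := out = is_generalized_mersenne_py_alt p gamma_max
instance (p : Int) (gamma_max : Int) (out : Bool × (Int × Int × Int)) : Decidable (Spec_is_generalized_mersenne_py p gamma_max out) := by unfold Spec_is_generalized_mersenne_py; infer_instance

-- ===== CLAIM (what is proved, stated in full; the proofs are below) =====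
def Claim_equal_is_generalized_mersenne_py : Prop := ∀ (p : Int) (gamma_max : Int), Dom_is_generalized_mersenne_py p gamma_max → Spec_is_generalized_mersenne_py p gamma_max (is_generalized_mersenne_py p gamma_max)

-- ===== LEMMAS AND PROOFS =====

-- bit_length is the unique b with 2^(b-1) ≤ |q| < 2^b
lemma pv_bitLength_eq (q : Int) (hq : 1 ≤ q) (b : Nat) (hb : 1 ≤ b)
    (h1 : 2 ^ (b - 1) ≤ q.natAbs) (h2 : q.natAbs < 2 ^ b) :
    PySem.Int.bitLength q = b := by
  have hA := PySem.Int.lt_two_pow_bitLength q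
  have hB := PySem.Int.two_pow_bitLength_le q (by omega)
  set s := PySem.Int.bitLength q with hs
  by_contra hne
  rcases Nat.lt_or_ge s b with h | h
  · have : (2:Nat) ^ s ≤ 2 ^ (b - 1) := Nat.pow_le_pow_right (by norm_num) (by omega)
    omega
  · have : (2:Nat) ^ b ≤ 2 ^ (s - 1) := Nat.pow_le_pow_right (by norm_num) (by omega)
    omega

lemma pv_inner_fail (p gm alpha q : Int)
    (hquot : PySem.Int.floordiv (p + 1) (2 ^ alpha.toNat) = q) :
    ∀ l : List Int,
      (∀ beta ∈ l, ¬(0 < (2:Int) ^ beta.toNat - q ∧ (2:Int) ^ beta.toNat - q ≤ gm)) →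
      pvAInner p gm alpha l = none := by
  intro l
  induction l with
  | nil => intro _; rfl
  | cons beta rest ih =>
    intro h
    simp only [pvAInner, hquot]
    split_ifs with h1 h2
    · exact ih (fun b hb => h b (List.mem_cons_of_mem _ hb))
    · exact absurd h2 (h beta (List.mem_cons_self ..))
    · exact ih (fun b hb => h b (List.mem_cons_of_mem _ hb))

lemma pv_inner_scan (p gm alpha q : Int) (hq : 1 ≤ q)
    (hmod : PySem.Int.mod (p + 1) (2 ^ alpha.toNat) = 0)
    (hquot : PySem.Int.floordiv (p + 1) (2 ^ alpha.toNat) = q) :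
    ∀ (k b : Nat), b + k = 16 → 1 ≤ b → 2 ^ (b - 1) ≤ q.natAbs →
      pvAInner p gm alpha (PySem.List.pyRange (b : Int) 16 1) =
        (if PySem.Int.bitLength q ≤ 15 ∧ (2:Int) ^ PySem.Int.bitLength q - q ≤ gm
         then some (alpha, (PySem.Int.bitLength q : Int), (2:Int) ^ PySem.Int.bitLength q - q)
         else none) := by
  intro k
  induction k with
  | zero =>
    intro b hbk hb hinv
    have hb16 : b = 16 := by omega
    subst hb16
    rw [PySem.List.pyRange_one_eq_nil (by norm_num)]
    have hA := PySem.Int.lt_two_pow_bitLength q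
    have : (2:Nat) ^ 15 ≤ q.natAbs := by simpa using hinv
    have h15 : ¬ PySem.Int.bitLength q ≤ 15 := by
      intro hle
      have : (2:Nat) ^ PySem.Int.bitLength q ≤ 2 ^ 15 := Nat.pow_le_pow_right (by norm_num) hle
      omega
    rw [if_neg (by tauto)]
    rfl
  | succ k ih =>
    intro b hbk hb hinv
    have hblt : (b : Int) < 16 := by exact_mod_cast (by omega : b < 16)
    rw [PySem.List.pyRange_one_cons hblt]
    have hqcast : q = (q.natAbs : Int) := by omega
    have htn : ((b : Int)).toNat = b := by simp
    simp only [pvAInner, hquot, htn]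
    rw [if_neg (not_not.mpr hmod)]
    by_cases hcase : q.natAbs < 2 ^ b
    · -- beta = b is exactly bit_length q
      have hsb : PySem.Int.bitLength q = b := pv_bitLength_eq q hq b hb hinv hcase
      have habs : |q| = q := abs_of_nonneg (by omega)
      have h2 : q < (2:Int) ^ b := by
        have h := hcase; zify at h; rw [habs] at h; exact h
      have hpos : 0 < (2:Int) ^ b - q := by omega
      by_cases hgm : (2:Int) ^ b - q ≤ gm
      · rw [if_pos ⟨hpos, hgm⟩, if_pos (by rw [hsb]; exact ⟨by omega, hgm⟩), hsb]
      · rw [if_neg (by tauto)]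
        rw [if_neg (by rw [hsb]; tauto)]
        apply pv_inner_fail p gm alpha q hquot
        intro beta hbmem hcontra
        rcases PySem.List.mem_pyRange_one.mp hbmem with ⟨hlo, hhi⟩
        have hble : b ≤ beta.toNat := by omega
        have : (2:Int) ^ b ≤ 2 ^ beta.toNat := by
          exact_mod_cast Nat.pow_le_pow_right (by norm_num) hble
        exact hgm (by omega)
    · -- gamma ≤ 0 at beta = b; continue
      have habs : |q| = q := abs_of_nonneg (by omega)
      have h2 : (2:Int) ^ b ≤ q := by
        have h := (by omega : 2 ^ b ≤ q.natAbs); zify at h; rw [habs] at h; exact h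
      rw [if_neg (by rintro ⟨h1, -⟩; omega)]
      have : ((b : Int) + 1) = ((b + 1 : Nat) : Int) := by push_cast; ring
      rw [this]
      exact ih (b + 1) (by omega) (by omega) (by simpa using (by omega : 2 ^ b ≤ q.natAbs))

lemma pv_inner_nodiv (p gm alpha : Int)
    (hmod : PySem.Int.mod (p + 1) (2 ^ alpha.toNat) ≠ 0) :
    ∀ l : List Int, pvAInner p gm alpha l = none := by
  intro l
  induction l with
  | nil => rfl
  | cons beta rest ih => simp only [pvAInner]; rw [if_pos hmod]; exact ih

lemma pv_outer_eq (p gm : Int) (hp : 2 < p) :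
    ∀ l : List Int, pvAOuter p gm l = pvBLoop p gm l := by
  intro l
  induction l with
  | nil => rfl
  | cons alpha rest ih =>
    simp only [pvAOuter, pvBLoop]
    by_cases hmod : PySem.Int.mod (p + 1) (2 ^ alpha.toNat) = 0
    · set f : Int := 2 ^ alpha.toNat with hf
      set q : Int := PySem.Int.floordiv (p + 1) f with hq
      have hfpos : 0 < f := by positivity
      have heq := PySem.Int.floordiv_mul_add_mod (p + 1) f
      rw [hmod] at heq
      have hq1 : 1 ≤ q := by nlinarith [heq]
      have hscan := pv_inner_scan p gm alpha q hq1 hmod rfl 15 1 rfl (by norm_num)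
        (by simpa using (by omega : 1 ≤ q.natAbs))
      simp only [Nat.cast_one] at hscan
      rw [if_neg (by simp [hmod]), hscan]
      set s := PySem.Int.bitLength q with hs
      by_cases h15 : s ≤ 15
      · have h15' : ((s : Int)).toNat = s := by simp
        by_cases hgm : (2:Int) ^ s - q ≤ gm
        · rw [if_pos ⟨h15, hgm⟩]
          rw [if_pos (by exact_mod_cast (by omega : (s:Int) ≤ 15)), h15', if_pos hgm]
        · rw [if_neg (by tauto)]
          rw [if_pos (by exact_mod_cast (by omega : (s:Int) ≤ 15)), h15', if_neg hgm]
          exact ih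
      · rw [if_neg (by tauto), if_neg (by exact_mod_cast (by omega : ¬ (s:Int) ≤ 15))]
        exact ih
    · rw [pv_inner_nodiv p gm alpha hmod, if_pos hmod]
      exact ih

-- ===== VERDICT (by name: the statement is the Claim_ definition above) =====
theorem is_generalized_mersenne_py_spec : Claim_equal_is_generalized_mersenne_py := by
  intro p gm _
  unfold Spec_is_generalized_mersenne_py is_generalized_mersenne_py is_generalized_mersenne_py_alt
  by_cases hp : p ≤ 2
  · rw [if_pos hp, if_pos hp]
  · rw [if_neg hp, if_neg hp, pv_outer_eq p gm (by omega)]
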